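-- pv_equiv track=rewrite | github.com/ZGZhang-1997/TypeType | app.py | _compute_word_boundaries
-- ===== SOURCE A (Python) =====
-- def _compute_word_boundaries(sentence):
--     """计算每个单词片段在整句中的起止范围。"""
--     boundaries = []
--     i = 0
--     n = len(sentence)
--     while i < n:
--         # Start of a word-segment
--         start = i
--         # Advance past non-space chars
--         while i < n and sentence[i] != " ":
--             i += 1
--         # Include trailing spaces (they belong to this word-segment)
--         while i < n and sentence[i] == " ":
--             i += 1
--         # But if this is the last word, don't include trailing space
--         # Actually: include spaces as part of the segment so user
--         # must type them before moving to next word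
--         boundaries.append((start, i))
--     return boundaries
-- ===== SOURCE B (Python) =====
-- def _compute_word_boundaries(sentence):
--     """计算每个单词片段在整句中的起止范围。"""
--     # Different decomposition: find all segment-start positions globally
--     # (index 0, plus every non-space char directly preceded by a space),
--     # then pair consecutive starts into (start, next_start) boundaries.
--     if not sentence:
--         return []
--     n = len(sentence)
--     starts = [0] + [i for i in range(1, n)
--                     if sentence[i] != ' ' and sentence[i - 1] == ' ']
--     return list(zip(starts, starts[1:] + [n]))
-- ===== Notes on version B (the rewrite author's own statement) =====
-- stated objective: alternative
-- what changed: replaces A's nested two-pointer scanning loops with a global two-stage computation: a comprehension collects every segment-start index (0 plus each non-space char preceded by a space), then consecutive starts are zipped into (start, end) pairs.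
import Mathlib
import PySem

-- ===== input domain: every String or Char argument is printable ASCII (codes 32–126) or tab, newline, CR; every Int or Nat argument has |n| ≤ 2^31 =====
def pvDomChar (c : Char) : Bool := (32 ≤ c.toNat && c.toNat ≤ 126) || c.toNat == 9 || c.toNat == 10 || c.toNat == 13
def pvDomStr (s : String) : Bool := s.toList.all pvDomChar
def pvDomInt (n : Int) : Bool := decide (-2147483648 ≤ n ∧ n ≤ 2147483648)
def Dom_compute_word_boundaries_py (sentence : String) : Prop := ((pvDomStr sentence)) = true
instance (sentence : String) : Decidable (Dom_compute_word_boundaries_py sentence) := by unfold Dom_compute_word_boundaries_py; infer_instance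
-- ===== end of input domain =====

-- B replaces A's nested two-pointer scanning loops by a two-stage computation:
-- collect all segment-start indices globally, then zip consecutive starts
-- into (start, end) pairs (alternative decomposition, same O(n) cost).

-- ===== PORT A =====
-- inner `while i < n and sentence[i] != " ": i += 1`
def pvAdvNonSpace (s : List Char) (n i : Nat) : Nat :=
  if h : i < n ∧ s.getD i ' ' ≠ ' ' then pvAdvNonSpace s n (i + 1) else i
termination_by n - i
decreasing_by exact Nat.sub_succ_lt_self n i h.1

-- inner `while i < n and sentence[i] == " ": i += 1`
def pvAdvSpace (s : List Char) (n i : Nat) : Nat :=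
  if h : i < n ∧ s.getD i ' ' = ' ' then pvAdvSpace s n (i + 1) else i
termination_by n - i
decreasing_by exact Nat.sub_succ_lt_self n i h.1

theorem pvAdvNonSpace_le (s : List Char) (n i : Nat) : i ≤ pvAdvNonSpace s n i := by
  induction i using pvAdvNonSpace.induct s n with
  | case1 i h ih => rw [pvAdvNonSpace, dif_pos h]; omega
  | case2 i h => rw [pvAdvNonSpace, dif_neg h]

theorem pvAdvSpace_le (s : List Char) (n i : Nat) : i ≤ pvAdvSpace s n i := by
  induction i using pvAdvSpace.induct s n with
  | case1 i h ih => rw [pvAdvSpace, dif_pos h]; omega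
  | case2 i h => rw [pvAdvSpace, dif_neg h]

theorem pvStep_lt (s : List Char) (n i : Nat) (h : i < n) :
    i < pvAdvSpace s n (pvAdvNonSpace s n i) := by
  by_cases hc : s.getD i ' ' = ' '
  · rw [pvAdvNonSpace, dif_neg (fun hx => hx.2 hc)]
    rw [pvAdvSpace, dif_pos ⟨h, hc⟩]
    have := pvAdvSpace_le s n (i + 1)
    omega
  · have h1 : i + 1 ≤ pvAdvNonSpace s n i := by
      rw [pvAdvNonSpace, dif_pos ⟨h, hc⟩]; exact pvAdvNonSpace_le s n (i + 1)
    have h2 := pvAdvSpace_le s n (pvAdvNonSpace s n i)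
    omega

-- outer `while i < n` loop of A (start = i, the two inner loops advance i)
def pvOuterA (s : List Char) (n i : Nat) : List (Int × Int) :=
  if h : i < n then
    ((i : Int), ((pvAdvSpace s n (pvAdvNonSpace s n i)) : Int)) ::
      pvOuterA s n (pvAdvSpace s n (pvAdvNonSpace s n i))
  else []
termination_by n - i
decreasing_by exact Nat.sub_lt_sub_left h (pvStep_lt s n i h)

def compute_word_boundaries_py (sentence : String) : List (Int × Int) :=
  pvOuterA sentence.toList sentence.toList.length 0

-- ===== PORT B =====
-- `sentence[i] != ' ' and sentence[i-1] == ' '` of Source B's comprehension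
def pvIsBk (s : List Char) (i : Nat) : Bool :=
  s.getD i ' ' != ' ' && s.getD (i - 1) ' ' == ' '

-- `list(zip(starts, starts[1:] + [n]))`
def pvPairs (xs : List Nat) (n : Nat) : List (Int × Int) :=
  (xs.zip (xs.drop 1 ++ [n])).map (fun p => ((p.1 : Int), (p.2 : Int)))

def compute_word_boundaries_py_alt (sentence : String) : List (Int × Int) :=
  let s := sentence.toList
  if s = [] then []
  else pvPairs (0 :: (List.range' 1 (s.length - 1)).filter (fun i => pvIsBk s i)) s.length

-- ===== PRECONDITION & SPEC =====
def Spec_compute_word_boundaries_py (sentence : String) (out : List (Int × Int)) : Prop := out = compute_word_boundaries_py_alt sentence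
instance (sentence : String) (out : List (Int × Int)) : Decidable (Spec_compute_word_boundaries_py sentence out) := by unfold Spec_compute_word_boundaries_py; infer_instance

-- ===== CLAIM (what is proved, stated in full; the proofs are below) =====
def Claim_equal_compute_word_boundaries_py : Prop := ∀ (sentence : String), Dom_compute_word_boundaries_py sentence → Spec_compute_word_boundaries_py sentence (compute_word_boundaries_py sentence)

-- ===== LEMMAS AND PROOFS =====

theorem pvAdvNonSpace_le_n (s : List Char) (n i : Nat) (h : i ≤ n) :
    pvAdvNonSpace s n i ≤ n := by
  induction i using pvAdvNonSpace.induct s n with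
  | case1 i h' ih => rw [pvAdvNonSpace, dif_pos h']; exact ih (by omega)
  | case2 i h' => rw [pvAdvNonSpace, dif_neg h']; exact h

theorem pvAdvSpace_le_n (s : List Char) (n i : Nat) (h : i ≤ n) :
    pvAdvSpace s n i ≤ n := by
  induction i using pvAdvSpace.induct s n with
  | case1 i h' ih => rw [pvAdvSpace, dif_pos h']; exact ih (by omega)
  | case2 i h' => rw [pvAdvSpace, dif_neg h']; exact h

theorem pvAdvNonSpace_chars (s : List Char) (n i j : Nat) (h1 : i ≤ j)
    (h2 : j < pvAdvNonSpace s n i) : s.getD j ' ' ≠ ' ' := by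
  induction i using pvAdvNonSpace.induct s n with
  | case1 i h ih =>
    rw [pvAdvNonSpace, dif_pos h] at h2
    rcases Nat.eq_or_lt_of_le h1 with he | hl
    · exact he ▸ h.2
    · exact ih hl h2
  | case2 i h =>
    rw [pvAdvNonSpace, dif_neg h] at h2; omega

theorem pvAdvNonSpace_stop (s : List Char) (n i : Nat)
    (h : pvAdvNonSpace s n i < n) : s.getD (pvAdvNonSpace s n i) ' ' = ' ' := by
  induction i using pvAdvNonSpace.induct s n with
  | case1 i h' ih => rw [pvAdvNonSpace, dif_pos h'] at h ⊢; exact ih h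
  | case2 i h' =>
    rw [pvAdvNonSpace, dif_neg h'] at h ⊢
    by_contra hc
    exact h' ⟨h, hc⟩

theorem pvAdvSpace_chars (s : List Char) (n i j : Nat) (h1 : i ≤ j)
    (h2 : j < pvAdvSpace s n i) : s.getD j ' ' = ' ' := by
  induction i using pvAdvSpace.induct s n with
  | case1 i h ih =>
    rw [pvAdvSpace, dif_pos h] at h2
    rcases Nat.eq_or_lt_of_le h1 with he | hl
    · exact he ▸ h.2
    · exact ih hl h2
  | case2 i h =>
    rw [pvAdvSpace, dif_neg h] at h2; omega

theorem pvAdvSpace_stop (s : List Char) (n i : Nat)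
    (h : pvAdvSpace s n i < n) : s.getD (pvAdvSpace s n i) ' ' ≠ ' ' := by
  induction i using pvAdvSpace.induct s n with
  | case1 i h' ih => rw [pvAdvSpace, dif_pos h'] at h ⊢; exact ih h
  | case2 i h' =>
    rw [pvAdvSpace, dif_neg h'] at h ⊢
    intro hc
    exact h' ⟨h, hc⟩

-- the amount A's outer-loop body advances `i` by
def pvStep (s : List Char) (n i : Nat) : Nat := pvAdvSpace s n (pvAdvNonSpace s n i)

theorem pvStep_isBk (s : List Char) (i : Nat) (_hi : i < s.length)
    (he : pvStep s s.length i < s.length) : pvIsBk s (pvStep s s.length i) = true := by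
  set n := s.length with hn
  set e1 := pvAdvNonSpace s n i with he1
  have hAtE : s.getD (pvStep s n i) ' ' ≠ ' ' := pvAdvSpace_stop s n e1 he
  have he1e : e1 ≤ pvStep s n i := pvAdvSpace_le s n e1
  have he1n : e1 < n := lt_of_le_of_lt he1e he
  have hsp1 : s.getD e1 ' ' = ' ' := pvAdvNonSpace_stop s n i he1n
  have hgt : e1 + 1 ≤ pvStep s n i := by
    have : pvStep s n i = pvAdvSpace s n (e1 + 1) := by
      unfold pvStep
      rw [← he1, pvAdvSpace, dif_pos ⟨he1n, hsp1⟩]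
    rw [this]; exact pvAdvSpace_le s n (e1 + 1)
  have hse : pvAdvSpace s n e1 = pvStep s n i := rfl
  have hPrev : s.getD (pvStep s n i - 1) ' ' = ' ' :=
    pvAdvSpace_chars s n e1 (pvStep s n i - 1) (by omega) (by omega)
  unfold pvIsBk
  rw [List.getD_eq_getElem?_getD] at hAtE hPrev
  simp [hAtE, hPrev]

theorem pvStep_no_bk (s : List Char) (i j : Nat) (h1 : i < j)
    (h2 : j < pvStep s s.length i) : pvIsBk s j = false := by
  set n := s.length with hn
  set e1 := pvAdvNonSpace s n i with he1
  by_cases hje : j ≤ e1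
  · have h' : s.getD (j - 1) ' ' ≠ ' ' :=
      pvAdvNonSpace_chars s n i (j - 1) (by omega) (by omega)
    unfold pvIsBk
    rw [List.getD_eq_getElem?_getD] at h'
    simp [h']
  · have h' : s.getD j ' ' = ' ' :=
      pvAdvSpace_chars s n e1 j (by omega) h2
    unfold pvIsBk
    rw [List.getD_eq_getElem?_getD] at h'
    simp [h']

theorem pvPairs_eq_outer (s : List Char) (l : List Nat) : ∀ (p : Nat), p < s.length →
    List.Pairwise (· < ·) l →
    (∀ i, i ∈ l ↔ (p < i ∧ i < s.length ∧ pvIsBk s i = true)) →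
    pvPairs (p :: l) s.length = pvOuterA s s.length p := by
  induction l with
  | nil =>
    intro p hp _ hmem
    have hstep : pvStep s s.length p = s.length := by
      by_contra hne
      have hle : pvStep s s.length p ≤ s.length :=
        pvAdvSpace_le_n s s.length _ (pvAdvNonSpace_le_n s s.length p (le_of_lt hp))
      have hlt : pvStep s s.length p < s.length := lt_of_le_of_ne hle hne
      have hbad := (hmem _).mpr ⟨pvStep_lt s s.length p hp, hlt, pvStep_isBk s p hp hlt⟩
      simp at hbad
    rw [pvOuterA, dif_pos hp]
    have hstep' : pvAdvSpace s s.length (pvAdvNonSpace s s.length p) = s.length := hstep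
    rw [hstep', pvOuterA, dif_neg (lt_irrefl s.length)]
    simp [pvPairs]
  | cons e t ih =>
    intro p hp hpw hmem
    have hstep_lt : pvStep s s.length p < s.length := by
      by_contra hge
      have hle : pvStep s s.length p ≤ s.length :=
        pvAdvSpace_le_n s s.length _ (pvAdvNonSpace_le_n s s.length p (le_of_lt hp))
      have hst : pvStep s s.length p = s.length := by omega
      have he' := (hmem e).mp (List.mem_cons_self)
      have : pvIsBk s e = false := pvStep_no_bk s p e he'.1 (by omega)
      rw [he'.2.2] at this
      simp at this
    have hge_step : ∀ i ∈ e :: t, pvStep s s.length p ≤ i := by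
      intro i hi
      have hi' := (hmem i).mp hi
      by_contra hlt
      have : pvIsBk s i = false := pvStep_no_bk s p i hi'.1 (by omega)
      rw [hi'.2.2] at this
      simp at this
    have hstep_mem : pvStep s s.length p ∈ e :: t :=
      (hmem _).mpr ⟨pvStep_lt s s.length p hp, hstep_lt, pvStep_isBk s p hp hstep_lt⟩
    have he_eq : e = pvStep s s.length p := by
      rcases List.mem_cons.mp hstep_mem with h | h
      · exact h.symm
      · have h1 : e < pvStep s s.length p := (List.pairwise_cons.mp hpw).1 _ h
        have h2 : pvStep s s.length p ≤ e := hge_step e List.mem_cons_self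
        omega
    have htmem : ∀ i, i ∈ t ↔ (e < i ∧ i < s.length ∧ pvIsBk s i = true) := by
      intro i
      constructor
      · intro hi
        have hi' := (hmem i).mp (List.mem_cons_of_mem e hi)
        exact ⟨(List.pairwise_cons.mp hpw).1 i hi, hi'.2.1, hi'.2.2⟩
      · intro ⟨h1, h2, h3⟩
        have hpi : p < i := by
          have : p < e := by rw [he_eq]; exact pvStep_lt s s.length p hp
          omega
        rcases List.mem_cons.mp ((hmem i).mpr ⟨hpi, h2, h3⟩) with h | h
        · omega
        · exact h
    have hrec : pvPairs (p :: e :: t) s.length =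
        ((p : Int), (e : Int)) :: pvPairs (e :: t) s.length := by
      simp [pvPairs]
    rw [hrec, pvOuterA, dif_pos hp]
    have htail := ih e (he_eq ▸ hstep_lt) (List.pairwise_cons.mp hpw).2 htmem
    rw [htail, he_eq]
    rfl

-- ===== VERDICT (by name: the statement is the Claim_ definition above) =====
theorem compute_word_boundaries_py_spec : Claim_equal_compute_word_boundaries_py := by
  intro sentence _
  unfold Spec_compute_word_boundaries_py compute_word_boundaries_py compute_word_boundaries_py_alt
  by_cases hemp : sentence.toList = []
  · simp only [hemp, if_pos]
    rw [pvOuterA]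
    simp
  · have hn : 1 ≤ sentence.toList.length := by
      cases h : sentence.toList with
      | nil => exact absurd h hemp
      | cons a t => simp
    rw [if_neg hemp]
    refine (pvPairs_eq_outer sentence.toList _ 0 (by omega) ?_ ?_).symm
    · exact ((List.pairwise_lt_range' (s := 1) _ Nat.one_pos).sublist List.filter_sublist).imp (fun h => h)
    · intro i
      simp only [List.mem_filter, List.mem_range'_1]
      constructor
      · rintro ⟨⟨h1, h2⟩, h3⟩
        exact ⟨by omega, by omega, h3⟩
      · rintro ⟨h1, h2, h3⟩
        exact ⟨⟨by omega, by omega⟩, h3⟩
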